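-- pv_equiv track=rewrite | github.com/kangk1204/BRAID | benchmarks/run_decomposer_comparison.py | _resolve_baseline_variant
-- ===== SOURCE A (Python) =====
-- from typing import Any
--
-- def _resolve_baseline_variant(rows: list[dict[str, Any]]) -> str:
--     """Pick the most appropriate baseline for the current comparison set."""
--     ok_variants = {
--         str(row["variant"])
--         for row in rows
--         if row.get("status") == "ok" and row.get("variant") is not None
--     }
--     for preferred in ("legacy_no_motif_validation", "legacy"):
--         if preferred in ok_variants:
--             return preferred
--     if ok_variants:
--         return next(
--             str(row["variant"])
--             for row in rows
--             if row.get("status") == "ok" and row.get("variant") is not None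
--         )
--     return "legacy"
-- ===== SOURCE B (Python) =====
-- _RANK = {"legacy_no_motif_validation": 0, "legacy": 1}
--
-- def _resolve_baseline_variant(rows):
--     """Single pass: keep the ok variant of minimal preference rank
--     (0 = legacy_no_motif_validation, 1 = legacy, 2 = anything else);
--     strict comparison keeps the first occurrence at each rank."""
--     best = None  # (rank, variant)
--     for row in rows:
--         if row.get("status") == "ok" and row.get("variant") is not None:
--             v = str(row["variant"])
--             r = _RANK.get(v, 2)
--             if best is None or r < best[0]:
--                 best = (r, v)
--     return best[1] if best is not None else "legacy"
-- ===== Notes on version B (the rewrite author's own statement) =====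
-- stated objective: alternative
-- what changed: B replaces A's set comprehension + preference-membership loop + second next(...) rescan by a single fold over rows that keeps the ok variant of minimal preference rank (min-by-rank accumulator, first occurrence wins on ties).
import Mathlib
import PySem

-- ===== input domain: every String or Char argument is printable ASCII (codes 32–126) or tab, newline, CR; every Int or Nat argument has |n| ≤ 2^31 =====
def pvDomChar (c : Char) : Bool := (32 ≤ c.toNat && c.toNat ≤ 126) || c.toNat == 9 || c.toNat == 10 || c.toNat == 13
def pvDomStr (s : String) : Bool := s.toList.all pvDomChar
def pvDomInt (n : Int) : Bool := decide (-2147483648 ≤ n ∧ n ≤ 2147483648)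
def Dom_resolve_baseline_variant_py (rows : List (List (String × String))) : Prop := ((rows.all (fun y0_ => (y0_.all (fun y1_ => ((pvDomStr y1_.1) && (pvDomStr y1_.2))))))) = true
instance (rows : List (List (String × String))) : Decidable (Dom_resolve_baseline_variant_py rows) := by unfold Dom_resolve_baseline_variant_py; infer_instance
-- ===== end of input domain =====

-- B replaces A's set + preference loop + second rescan by one fold over rows keeping the
-- ok variant of minimal preference rank (first occurrence wins). Objective: alternative.


-- ===== PORT A =====
-- the comprehension filter: row.get("status") == "ok" and row.get("variant") is not None,
-- yielding str(row["variant"])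
def pvOkVariant (row : List (String × String)) : Option String :=
  if (PySem.Dict.mk row).get? "status" = some "ok" then (PySem.Dict.mk row).get? "variant" else none

def resolve_baseline_variant_py (rows : List (List (String × String))) : String :=
  let ok_variants : PySem.Set String := PySem.Set.ofList (rows.filterMap pvOkVariant)
  if PySem.Set.contains ok_variants "legacy_no_motif_validation" then "legacy_no_motif_validation"
  else if PySem.Set.contains ok_variants "legacy" then "legacy"
  else if ¬ ok_variants.isEmpty then
    -- next(...) over the regenerated comprehension; the guard makes it nonempty,
    -- so head?.getD's default is never the result
    (rows.filterMap pvOkVariant).head?.getD "legacy"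
  else "legacy"

-- ===== PORT B =====
-- _RANK.get(v, 2)
def pvRank (v : String) : Nat :=
  PySem.Dict.getD (PySem.Dict.mk [("legacy_no_motif_validation", 0), ("legacy", 1)]) v 2

-- 'if best is None or r < best[0]: best = (r, v)'
def pvConsider (best : Option (Nat × String)) (v : String) : Option (Nat × String) :=
  let r := pvRank v
  match best with
  | none => some (r, v)
  | some b => if r < b.1 then some (r, v) else some b

-- one loop iteration of B: the inline status/variant check, then the accumulator update
def pvStep (best : Option (Nat × String)) (row : List (String × String)) : Option (Nat × String) :=
  if (PySem.Dict.mk row).get? "status" = some "ok" then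
    match (PySem.Dict.mk row).get? "variant" with
    | none => best
    | some v => pvConsider best v
  else best

def resolve_baseline_variant_py_alt (rows : List (List (String × String))) : String :=
  match rows.foldl pvStep none with
  | some b => b.2
  | none => "legacy"

-- ===== PRECONDITION & SPEC =====
def Spec_resolve_baseline_variant_py (rows : List (List (String × String))) (out : String) : Prop := out = resolve_baseline_variant_py_alt rows
instance (rows : List (List (String × String))) (out : String) : Decidable (Spec_resolve_baseline_variant_py rows out) := by unfold Spec_resolve_baseline_variant_py; infer_instance

-- ===== CLAIM (what is proved, stated in full; the proofs are below) =====
def Claim_equal_resolve_baseline_variant_py : Prop := ∀ (rows : List (List (String × String))), Dom_resolve_baseline_variant_py rows → Spec_resolve_baseline_variant_py rows (resolve_baseline_variant_py rows)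

-- ===== LEMMAS AND PROOFS =====

-- one B loop step, expressed through A's comprehension filter
theorem pvStep_eq (acc : Option (Nat × String)) (r : List (String × String)) :
    pvStep acc r = match pvOkVariant r with | none => acc | some v => pvConsider acc v := by
  unfold pvStep pvOkVariant
  split_ifs with h
  · cases (PySem.Dict.mk r).get? "variant" <;> rfl
  · rfl

-- B's fold over rows equals the same accumulator fold over the filtered variant list
theorem pv_fold_filterMap (rows : List (List (String × String))) (acc : Option (Nat × String)) :
    rows.foldl pvStep acc = (rows.filterMap pvOkVariant).foldl pvConsider acc := by
  induction rows generalizing acc with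
  | nil => rfl
  | cons r t ih =>
    rw [List.foldl_cons, List.filterMap_cons, pvStep_eq]
    cases pvOkVariant r <;> simp [ih]

theorem pv_rank0 : pvRank "legacy_no_motif_validation" = 0 := by decide
theorem pv_rank1 : pvRank "legacy" = 1 := by decide

theorem pvRank_eq (a : String) :
    pvRank a = if a = "legacy_no_motif_validation" then 0 else if a = "legacy" then 1 else 2 := by
  by_cases h1 : a = "legacy_no_motif_validation"
  · subst h1; decide
  · by_cases h2 : a = "legacy"
    · subst h2; decide
    · unfold pvRank PySem.Dict.getD PySem.Dict.get?
      simp [List.find?, show ("legacy_no_motif_validation" == a) = false from by simp [Ne.symm h1],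
        show ("legacy" == a) = false from by simp [Ne.symm h2], h1, h2]

-- once the accumulator has rank 0, it never changes
theorem pv_fold0 (ok : List String) (x : String) :
    ok.foldl pvConsider (some (0, x)) = some (0, x) := by
  induction ok with
  | nil => rfl
  | cons a t ih => simp [pvConsider, ih]

-- with rank 1 in the accumulator, only the rank-0 variant can replace it
theorem pv_fold1 (ok : List String) :
    ok.foldl pvConsider (some (1, "legacy")) =
      if "legacy_no_motif_validation" ∈ ok then some (0, "legacy_no_motif_validation")
      else some (1, "legacy") := by
  induction ok with
  | nil => rfl
  | cons a t ih =>
    by_cases ha : a = "legacy_no_motif_validation"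
    · subst ha
      simp [pvConsider, pv_rank0, pv_fold0]
    · have hr : ¬ pvRank a < 1 := by
        rw [pvRank_eq]; split_ifs <;> omega
      simp [pvConsider, hr, ih, Ne.symm ha]

-- with an ordinary rank-2 variant in the accumulator, the fold computes the preferred pick
theorem pv_fold2 (ok : List String) (v : String) :
    ok.foldl pvConsider (some (2, v)) =
      if "legacy_no_motif_validation" ∈ ok then some (0, "legacy_no_motif_validation")
      else if "legacy" ∈ ok then some (1, "legacy")
      else some (2, v) := by
  induction ok with
  | nil => rfl
  | cons a t ih =>
    by_cases h1 : a = "legacy_no_motif_validation"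
    · subst h1; simp [pvConsider, pv_rank0, pv_fold0]
    · by_cases h2 : a = "legacy"
      · subst h2; simp [pvConsider, pv_rank1, pv_fold1]
      · have hr : pvRank a = 2 := by
          rw [pvRank_eq]; simp [h1, h2]
        simp [pvConsider, hr, ih, Ne.symm h1, Ne.symm h2]

theorem pv_main (rows : List (List (String × String))) :
    resolve_baseline_variant_py rows = resolve_baseline_variant_py_alt rows := by
  unfold resolve_baseline_variant_py resolve_baseline_variant_py_alt
  rw [pv_fold_filterMap]
  simp only [PySem.Set.contains_eq_listContains, List.contains_iff_mem, PySem.Set.mem_ofList]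
  cases hl : rows.filterMap pvOkVariant with
  | nil => simp [PySem.Set.ofList]
  | cons v t =>
    simp only [List.foldl_cons, pvConsider]
    by_cases h1 : v = "legacy_no_motif_validation"
    · subst h1
      simp [pv_rank0, pv_fold0]
    · by_cases h2 : v = "legacy"
      · subst h2
        simp only [pv_rank1, pv_fold1]
        by_cases ht : "legacy_no_motif_validation" ∈ t <;>
          simp [ht]
      · have hr : pvRank v = 2 := by
          rw [pvRank_eq]; simp [h1, h2]
        simp only [hr, pv_fold2 t v]
        by_cases t1 : "legacy_no_motif_validation" ∈ t <;>
          by_cases t2 : "legacy" ∈ t <;>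
            simp [t1, t2, PySem.Set.ofList_cons, List.isEmpty, Ne.symm h1, Ne.symm h2]

-- ===== VERDICT (by name: the statement is the Claim_ definition above) =====
theorem resolve_baseline_variant_py_spec : Claim_equal_resolve_baseline_variant_py := by
  intro rows _
  unfold Spec_resolve_baseline_variant_py
  exact pv_main rows
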